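-- pv_equiv track=rewrite | github.com/LukasLiss/totem-tool | totem_lib/src/totem_lib/occn/discover.py | _sorted_k_partitions
-- ===== SOURCE A (Python) =====
-- def _sorted_k_partitions(seq: list, k: int):
--     """
--     Returns a list of all unique k-partitions of `seq`.
--     Each partition is a list of parts, and each part is a tuple.
--
--     Parameters
--     -----------
--     seq
--         The sequence to partition.
--     k
--         The number of partitions.
--
--     Returns
--     --------
--     list
--         List of sorted k-partitions.
--     """
--     n = len(seq)
--     groups = []  # a list of lists, currently empty
--
--     def generate_partitions(i):
--         if i >= n:
--             yield list(map(tuple, groups))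
--         else:
--             if n - i > k - len(groups):
--                 for group in groups:
--                     group.append(seq[i])
--                     yield from generate_partitions(i + 1)
--                     group.pop()
--
--             if len(groups) < k:
--                 groups.append([seq[i]])
--                 yield from generate_partitions(i + 1)
--                 groups.pop()
--
--     result = generate_partitions(0)
--
--     # Sort the parts in each partition in shortlex order
--     result = [sorted(ps, key=lambda p: (len(p), p)) for ps in result]
--     # Sort partitions by the length of each part, then lexicographically.
--     result = sorted(result, key=lambda ps: (*map(len, ps), ps))
--
--     return result
-- ===== SOURCE B (Python) =====
-- def _sorted_k_partitions(seq: list, k: int):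
--     """All unique partitions of `seq` into exactly min(k, len(seq)) parts
--     (parts as tuples), enumerated via restricted-growth label strings and
--     bucketing, instead of backtracking on a mutable list of groups."""
--     if not seq:
--         return [[]]
--     if k <= 0:
--         return []
--     n = len(seq)
--     kk = min(k, n)  # no more parts than elements are possible
--
--     # All label arrays a[0..n-1] with a[i] <= min(1 + max(prefix), kk - 1),
--     # kept only when exactly kk distinct labels are used.
--     def labelings(i, m):
--         if i == n:
--             return [[]] if m == kk else []
--         if m + (n - i) < kk:
--             return []  # too few elements left ever to reach kk distinct labels
--         res = []
--         for lab in range(min(m + 1, kk)):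
--             for rest in labelings(i + 1, m + 1 if lab == m else m):
--                 res.append([lab] + rest)
--         return res
--
--     partitions = []
--     for labels in labelings(0, 0):
--         parts = [[] for _ in range(kk)]
--         for x, lab in zip(seq, labels):
--             parts[lab].append(x)
--         partitions.append([tuple(p) for p in parts])
--
--     partitions = [sorted(ps, key=lambda p: (len(p), p)) for ps in partitions]
--     partitions.sort(key=lambda ps: (*map(len, ps), ps))
--     return partitions
-- ===== Notes on version B (the rewrite author's own statement) =====
-- stated objective: alternative
-- what changed: Replaces A's backtracking generator over a mutable list of groups (append/recurse/pop with yield) by an enumeration of restricted-growth label strings capped at kk = min(k, n) distinct labels, followed by bucketing the elements by label; the same two-stage sort is then applied.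
import Mathlib
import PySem

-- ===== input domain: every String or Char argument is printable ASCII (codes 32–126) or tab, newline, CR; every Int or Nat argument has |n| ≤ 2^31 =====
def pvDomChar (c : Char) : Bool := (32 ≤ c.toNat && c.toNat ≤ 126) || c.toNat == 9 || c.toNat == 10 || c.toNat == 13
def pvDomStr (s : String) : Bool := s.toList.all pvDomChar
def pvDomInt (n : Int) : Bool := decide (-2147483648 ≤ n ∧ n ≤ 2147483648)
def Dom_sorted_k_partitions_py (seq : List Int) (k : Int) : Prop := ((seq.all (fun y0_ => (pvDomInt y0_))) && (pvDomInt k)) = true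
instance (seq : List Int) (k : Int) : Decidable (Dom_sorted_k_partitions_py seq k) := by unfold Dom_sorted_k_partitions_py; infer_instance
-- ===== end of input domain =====

-- B replaces A's backtracking generator over a mutable list of groups by an
-- enumeration of restricted-growth label strings followed by bucketing; same
-- two-stage sort, same results (alternative decomposition, no speed claim).

-- ===== PORT A =====
-- generate_partitions(i) with the mutable outer state `groups` passed explicitly;
-- group.append/pop becomes a functional update, yield-from becomes list append.
def pyA_gen (seq : List Int) (n k : Int) (groups : List (List Int)) (i : Int) : List (List (List Int)) :=
  if n ≤ i then [groups]  -- yield list(map(tuple, groups)); tuple() is the identity under the list encoding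
  else
    -- seq[i]: 0 ≤ i < n = len(seq) on every call, so pyGet? never misses (default unreachable)
    let x := (PySem.List.pyGet? seq i).getD 0
    (if n - i > k - (groups.length : Int) then
       (List.range groups.length).flatMap (fun j =>
         pyA_gen seq n k (groups.set j (groups.getD j [] ++ [x])) (i + 1))
     else []) ++
    (if (groups.length : Int) < k then pyA_gen seq n k (groups ++ [[x]]) (i + 1) else [])
termination_by (n - i).toNat
decreasing_by all_goals omega

def sorted_k_partitions_py (seq : List Int) (k : Int) : List (List (List Int)) :=
  let n : Int := seq.length
  let result := pyA_gen seq n k [] 0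
  let result := result.map (fun ps => PySem.List.sorted2 ps (fun p => (p.length : Int)) (fun p => p))
  PySem.List.sorted2 result (fun ps => ps.map (fun p => (p.length : Int))) (fun ps => ps)

-- ===== PORT B =====
-- labelings(i, m): all restricted-growth label arrays for the remaining elements,
-- labels capped below kk, kept only when exactly kk distinct labels are used.
def pyB_labelings (kk : Nat) : List Int → Nat → List (List Nat)
  | [], m => if m = kk then [[]] else []
  | _ :: xs, m =>
      -- too few elements left ever to reach kk distinct labels
      if m + (xs.length + 1) < kk then []
      else
        (List.range (min (m + 1) kk)).flatMap (fun lab =>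
          (pyB_labelings kk xs (if lab = m then m + 1 else m)).map (fun rest => lab :: rest))

-- parts = [[] for _ in range(kk)]; for x, lab in zip(seq, labels): parts[lab].append(x)
-- (lab < kk on every step, so getD never falls back to its default)
def pyB_bucket (kk : Nat) (seq : List Int) (labs : List Nat) : List (List Int) :=
  (seq.zip labs).foldl (fun parts xl => parts.set xl.2 (parts.getD xl.2 [] ++ [xl.1]))
    (List.replicate kk ([] : List Int))

def sorted_k_partitions_py_alt (seq : List Int) (k : Int) : List (List (List Int)) :=
  match seq with
  | [] => [[]]
  | _ :: _ =>
    if k ≤ 0 then []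
    else
      let kk : Nat := min k.toNat seq.length  -- no more parts than elements are possible
      let partitions := (pyB_labelings kk seq 0).map (fun labs => pyB_bucket kk seq labs)
      let partitions := partitions.map (fun ps => PySem.List.sorted2 ps (fun p => (p.length : Int)) (fun p => p))
      PySem.List.sorted2 partitions (fun ps => ps.map (fun p => (p.length : Int))) (fun ps => ps)

-- ===== PRECONDITION & SPEC =====
def Spec_sorted_k_partitions_py (seq : List Int) (k : Int) (out : List (List (List Int))) : Prop := out = sorted_k_partitions_py_alt seq k
instance (seq : List Int) (k : Int) (out : List (List (List Int))) : Decidable (Spec_sorted_k_partitions_py seq k out) := by unfold Spec_sorted_k_partitions_py; infer_instance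

-- ===== CLAIM (what is proved, stated in full; the proofs are below) =====
def Claim_equal_sorted_k_partitions_py : Prop := ∀ (seq : List Int) (k : Int), Dom_sorted_k_partitions_py seq k → Spec_sorted_k_partitions_py seq k (sorted_k_partitions_py seq k)

-- ===== LEMMAS AND PROOFS =====

-- A's recursion restated on the suffix seq[i:] instead of the index i.
def genRest (k : Int) : List Int → List (List Int) → List (List (List Int))
  | [], groups => [groups]
  | x :: xs, groups =>
      (if ((xs.length : Int) + 1 > k - (groups.length : Int)) then
         (List.range groups.length).flatMap (fun j =>
           genRest k xs (groups.set j (groups.getD j [] ++ [x])))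
       else []) ++
      (if ((groups.length : Int) < k) then genRest k xs (groups ++ [[x]]) else [])

-- placing the elements into `groups` one by one, as directed by a label list
def applyList (groups : List (List Int)) : List Int → List Nat → List (List Int)
  | [], _ => groups
  | _ :: _, [] => groups  -- unreachable on label lists produced by pyB_labelings
  | x :: xs, l :: ls =>
      applyList (if l = groups.length then groups ++ [[x]]
                 else groups.set l (groups.getD l [] ++ [x])) xs ls

theorem bridge (seq : List Int) (k : Int) :
    ∀ (xs : List Int) (i : Int) (groups : List (List Int)), 0 ≤ i →
      seq.drop i.toNat = xs →
      pyA_gen seq seq.length k groups i = genRest k xs groups := by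
  intro xs
  induction xs with
  | nil =>
      intro i groups hi hdrop
      have hlen : seq.length ≤ i.toNat := by
        have := congrArg List.length hdrop
        simp only [List.length_drop, List.length_nil] at this
        omega
      rw [pyA_gen, if_pos (by omega)]
      rfl
  | cons x xs ih =>
      intro i groups hi hdrop
      have hlt : i.toNat < seq.length := by
        have := congrArg List.length hdrop
        simp only [List.length_drop, List.length_cons] at this
        omega
      have h2 := List.drop_eq_getElem_cons hlt
      rw [hdrop] at h2
      have hx : x = seq[i.toNat] ∧ seq.drop (i.toNat + 1) = xs := by
        simp only [List.cons.injEq] at h2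
        exact ⟨h2.1, h2.2.symm⟩
      have hget : PySem.List.pyGet? seq i = some x := by
        have := PySem.List.pyGet?_eq_some_getElem (xs := seq) (i := i) hi (by omega)
        rw [this, hx.1]
      have hlen2 : (seq.length : Int) - i = (xs.length : Int) + 1 := by
        have := congrArg List.length hdrop
        simp only [List.length_drop, List.length_cons] at this
        omega
      have hi1 : (i + 1).toNat = i.toNat + 1 := by omega
      rw [pyA_gen, if_neg (by omega)]
      simp only [hget, Option.getD_some, hlen2]
      rw [genRest]
      congr 1
      · split_ifs with hc
        · congr 1
          funext j
          exact ih (i + 1) _ (by omega) (by rw [hi1, hx.2])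
        · rfl
      · split_ifs with hc
        · exact ih (i + 1) _ (by omega) (by rw [hi1, hx.2])
        · rfl

theorem labelings_small (kk : Nat) : ∀ (xs : List Int) (m : Nat), m + xs.length < kk → pyB_labelings kk xs m = [] := by
  intro xs
  induction xs with
  | nil => intro m h; simp at h; simp [pyB_labelings]; omega
  | cons x xs ih =>
      intro m h
      simp only [List.length_cons] at h
      rw [pyB_labelings, if_pos (by omega)]

theorem main_lemma (k : Int) : ∀ (xs : List Int) (groups : List (List Int)),
    k - (groups.length : Int) ≤ xs.length → (groups.length : Int) ≤ k →
    genRest k xs groups = (pyB_labelings k.toNat xs groups.length).map (fun labs => applyList groups xs labs) := by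
  intro xs
  induction xs with
  | nil =>
      intro groups h1 h2
      simp only [List.length_nil, Nat.cast_zero] at h1
      have hm : groups.length = k.toNat := by omega
      simp [genRest, pyB_labelings, hm, applyList]
  | cons x xs ih =>
      intro groups h1 h2
      have hk0 : 0 ≤ k := le_trans (by positivity) h2
      set m := groups.length with hmdef
      simp only [List.length_cons] at h1
      rw [genRest, pyB_labelings, if_neg (by omega : ¬ m + (xs.length + 1) < k.toNat)]
      rw [List.map_flatMap]
      by_cases hm : m < k.toNat
      · -- still room for a new group
        have hmin : min (m + 1) k.toNat = m + 1 := by omega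
        rw [hmin, List.range_succ, List.flatMap_append, List.flatMap_cons, List.flatMap_nil,
          List.append_nil]
        congr 1
        · -- existing-group branch vs labels < m
          by_cases hc : (xs.length : Int) + 1 > k - (m : Int)
          · rw [if_pos hc]
            apply List.flatMap_congr
            intro j hj
            simp only [List.mem_range] at hj
            rw [ih (groups.set j (groups.getD j [] ++ [x])) (by simp [← hmdef]; omega)
                (by simp [← hmdef]; omega)]
            simp only [List.length_set, ← hmdef, List.map_map]
            rw [if_neg (by omega : ¬ j = m)]
            apply List.map_congr_left
            intro ls _
            simp only [Function.comp_apply, applyList]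
            rw [if_neg (by omega : ¬ j = groups.length)]
          · rw [if_neg hc]
            have hsmall : ∀ lab, lab < m → pyB_labelings k.toNat xs (if lab = m then m + 1 else m) = [] := by
              intro lab hlab
              rw [if_neg (by omega)]
              exact labelings_small k.toNat xs m (by omega)
            rw [List.flatMap_eq_nil_iff.mpr ?_]
            intro lab hlab
            simp only [List.mem_range] at hlab
            rw [hsmall lab hlab]
            simp
        · -- new-group branch vs label = m
          rw [if_pos (by omega : (m : Int) < k)]
          rw [ih (groups ++ [[x]]) (by simp [← hmdef]; omega) (by simp [← hmdef]; omega)]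
          simp only [List.length_append, List.length_cons, List.length_nil, ← hmdef,
            Nat.zero_add, List.map_map]
          simp only [if_true]
          apply List.map_congr_left
          intro ls _
          simp only [Function.comp_apply, applyList]
          rw [if_pos hmdef]
      · -- all k groups already open
        have hmeq : m = k.toNat := by omega
        have hmin : min (m + 1) k.toNat = k.toNat := by omega
        rw [hmin, if_neg (by omega : ¬ (m : Int) < k), List.append_nil]
        rw [if_pos (by omega : (xs.length : Int) + 1 > k - (m : Int))]
        have hrange : List.range groups.length = List.range k.toNat := by rw [← hmdef, hmeq]
        rw [hrange]
        apply List.flatMap_congr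
        intro j hj
        simp only [List.mem_range] at hj
        rw [ih (groups.set j (groups.getD j [] ++ [x])) (by simp [← hmdef]; omega)
            (by simp [← hmdef]; omega)]
        simp only [List.length_set, ← hmdef, List.map_map]
        rw [if_neg (by omega : ¬ j = m)]
        apply List.map_congr_left
        intro ls _
        simp only [Function.comp_apply, applyList]
        rw [if_neg (by omega : ¬ j = groups.length)]

theorem bucket_eq_applyList (kk : Nat) : ∀ (xs : List Int) (m : Nat) (labs : List Nat) (groups : List (List Int)),
    labs ∈ pyB_labelings kk xs m → groups.length = m →
    (xs.zip labs).foldl (fun parts xl => parts.set xl.2 (parts.getD xl.2 [] ++ [xl.1]))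
      (groups ++ List.replicate (kk - m) ([] : List Int)) = applyList groups xs labs := by
  intro xs
  induction xs with
  | nil =>
      intro m labs groups hmem hlen
      simp only [pyB_labelings] at hmem
      by_cases hmk : m = kk
      · rw [if_pos hmk] at hmem
        simp only [List.mem_singleton] at hmem
        subst hmem hmk
        simp [applyList]
      · rw [if_neg hmk] at hmem; simp at hmem
  | cons x xs ih =>
      intro m labs groups hmem hlen
      rw [pyB_labelings] at hmem
      by_cases hg : m + (xs.length + 1) < kk
      · rw [if_pos hg] at hmem; simp at hmem
      rw [if_neg hg] at hmem
      simp only [List.mem_flatMap, List.mem_map, List.mem_range] at hmem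
      obtain ⟨lab, hlab, ls, hls, rfl⟩ := hmem
      rw [List.zip_cons_cons, List.foldl_cons]
      by_cases heq : lab = m
      · subst heq
        have hlt : lab < kk := by omega
        rw [if_pos rfl] at hls
        have hrep : List.replicate (kk - lab) ([] : List Int) =
            ([] : List Int) :: List.replicate (kk - (lab + 1)) [] := by
          rw [← List.replicate_succ]
          congr 1
          omega
        have hbase : (groups ++ List.replicate (kk - lab) ([] : List Int)).set lab
            ((groups ++ List.replicate (kk - lab) ([] : List Int)).getD lab [] ++ [x]) =
            (groups ++ [[x]]) ++ List.replicate (kk - (lab + 1)) ([] : List Int) := by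
          rw [List.getD_append_right _ _ _ _ (by omega : groups.length ≤ lab),
            List.set_append_right _ _ (by omega : groups.length ≤ lab)]
          rw [hrep, hlen]
          simp
        rw [hbase, ih (lab + 1) ls (groups ++ [[x]]) hls (by simp [hlen])]
        simp only [applyList]
        rw [if_pos hlen.symm]
      · have hlab' : lab < m := by omega
        have hbase : (groups ++ List.replicate (kk - m) ([] : List Int)).set lab
            ((groups ++ List.replicate (kk - m) ([] : List Int)).getD lab [] ++ [x]) =
            groups.set lab (groups.getD lab [] ++ [x]) ++ List.replicate (kk - m) ([] : List Int) := by
          rw [List.getD_append _ _ _ _ (by omega : lab < groups.length),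
            List.set_append_left _ _ (by omega : lab < groups.length)]
        rw [if_neg heq] at hls
        rw [hbase, ih m ls _ hls (by simp [hlen])]
        simp only [applyList]
        rw [if_neg (by omega : ¬ lab = groups.length)]

theorem gen_singles (k : Int) : ∀ (xs : List Int) (groups : List (List Int)),
    (groups.length : Int) + xs.length < k →
    genRest k xs groups = [groups ++ xs.map (fun x => [x])] := by
  intro xs
  induction xs with
  | nil => intro groups h; simp [genRest]
  | cons x xs ih =>
      intro groups h
      simp only [List.length_cons] at h
      have hc1 : ¬ ((xs.length : Int) + 1 > k - (groups.length : Int)) := by push_cast at h ⊢; omega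
      have hc2 : (groups.length : Int) < k := by push_cast at h ⊢; omega
      simp only [genRest, if_neg hc1, if_pos hc2, List.nil_append]
      rw [ih (groups ++ [[x]]) (by simp; push_cast at h ⊢; omega)]
      simp

theorem labelings_full : ∀ (xs : List Int) (m : Nat),
    pyB_labelings (m + xs.length) xs m = [List.range' m xs.length] := by
  intro xs
  induction xs with
  | nil => intro m; simp [pyB_labelings]
  | cons x xs ih =>
      intro m
      have hmin : min (m + 1) (m + (x :: xs).length) = m + 1 := by
        simp only [List.length_cons]; omega
      rw [pyB_labelings, if_neg (by simp : ¬ m + (xs.length + 1) < m + (x :: xs).length)]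
      simp only [hmin, List.range_succ, List.flatMap_append,
        List.flatMap_cons, List.flatMap_nil]
      have h1 : (List.range m).flatMap (fun lab =>
          (pyB_labelings (m + (x :: xs).length) xs (if lab = m then m + 1 else m)).map
            (fun rest => lab :: rest)) = [] := by
        apply List.flatMap_eq_nil_iff.mpr
        intro lab hlab
        simp only [List.mem_range] at hlab
        rw [if_neg (by omega)]
        rw [labelings_small _ xs m (by simp only [List.length_cons]; omega)]
        simp
      rw [h1]
      simp only [if_true, List.nil_append, List.append_nil]
      have h2 : m + (x :: xs).length = (m + 1) + xs.length := by simp; omega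
      rw [h2, ih (m+1)]
      simp [List.range']

theorem applyList_range' : ∀ (xs : List Int) (groups : List (List Int)),
    applyList groups xs (List.range' groups.length xs.length) = groups ++ xs.map (fun x => [x]) := by
  intro xs
  induction xs with
  | nil => intro groups; simp [applyList]
  | cons x xs ih =>
      intro groups
      simp only [List.length_cons, List.range'_succ, applyList, if_true]
      have : groups.length + 1 = (groups ++ [[x]]).length := by simp
      rw [this, ih (groups ++ [[x]])]
      simp

theorem raw_eq (seq : List Int) (k : Int) (hk : ¬ k ≤ 0) :
    genRest k seq [] = (pyB_labelings (min k.toNat seq.length) seq 0).map (fun labs => pyB_bucket (min k.toNat seq.length) seq labs) := by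
  by_cases hkn : k ≤ (seq.length : Int)
  · -- 1 ≤ k ≤ n: the main regime
    have hle : k.toNat ≤ seq.length := by omega
    rw [Nat.min_eq_left hle]
    rw [main_lemma k seq [] (by simpa using hkn) (by simp; omega)]
    apply List.map_congr_left
    intro labs hmem
    have := bucket_eq_applyList k.toNat seq 0 labs [] (by simpa using hmem) rfl
    rw [← this]
    simp [pyB_bucket]
  · -- k > n: both sides degrade to the single all-singletons partition
    have hle : seq.length ≤ k.toNat := by omega
    rw [Nat.min_eq_right hle]
    rw [gen_singles k seq [] (by simp; omega)]
    have hfull := labelings_full seq 0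
    simp only [Nat.zero_add] at hfull
    rw [hfull]
    simp only [List.map_cons, List.map_nil]
    have hmem : List.range' 0 seq.length ∈ pyB_labelings seq.length seq 0 := by
      rw [hfull]; exact List.mem_singleton.mpr rfl
    have := bucket_eq_applyList seq.length seq 0 (List.range' 0 seq.length) [] hmem rfl
    have happ := applyList_range' seq ([] : List (List Int))
    simp only [List.length_nil] at happ
    rw [happ] at this
    simp only [pyB_bucket]
    rw [show ([] : List (List Int)) ++ List.replicate (seq.length - 0) ([] : List Int) = List.replicate seq.length ([] : List Int) by simp] at this
    rw [this]

-- ===== VERDICT (by name: the statement is the Claim_ definition above) =====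
theorem sorted_k_partitions_py_spec : Claim_equal_sorted_k_partitions_py := by
  intro seq k _
  unfold Spec_sorted_k_partitions_py
  cases seq with
  | nil =>
      simp only [sorted_k_partitions_py, sorted_k_partitions_py_alt]
      rw [show pyA_gen [] ((List.length ([] : List Int) : Int)) k [] 0 = [[]] from by
        rw [pyA_gen]; simp]
      rfl
  | cons s ss =>
      simp only [sorted_k_partitions_py, sorted_k_partitions_py_alt]
      rw [bridge (s :: ss) k (s :: ss) 0 [] le_rfl (by simp)]
      by_cases hk : k ≤ 0
      · rw [if_pos hk]
        rw [show genRest k (s :: ss) [] = [] from by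
          rw [genRest]
          simp only [List.length_nil, Nat.cast_zero, sub_zero, List.range_zero,
            List.flatMap_nil]
          rw [if_pos (by omega : (ss.length : Int) + 1 > k), if_neg (by omega : ¬ (0 : Int) < k)]
          simp]
        rfl
      · rw [if_neg hk]
        rw [raw_eq (s :: ss) k hk]
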